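-- pv_equiv track=rewrite | github.com/eddiemo/ATDS | Rings&Ideals.py | buildfactorring
-- ===== SOURCE A (Python) =====
-- def buildfactorring(idealset, m):
--     used = [False] * m
--     factorring = {}
--     for val1 in range(m):
--         if not used[val1]:
--             for val2 in range(m):
--                 if (val1 - val2) % m in idealset:
--                     if factorring.get(val1) == None:
--                         factorring[val1] = []
--                     factorring[val1].append(val2)
--                     used[val2] = True
--             used[val1] = True
--     return factorring
-- ===== SOURCE B (Python) =====
-- def buildfactorring(idealset, m):
--     # Build each coset directly from the (reduced) ideal elements instead of
--     # scanning all m residues per representative.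
--     I = set(x for x in idealset if 0 <= x < m)
--     used = [False] * m
--     factorring = {}
--     for r in range(m):
--         if not used[r]:
--             members = sorted((r - d) % m for d in I)
--             if members:
--                 factorring[r] = members
--             for v in members:
--                 used[v] = True
--             used[r] = True
--     return factorring
-- ===== Notes on version B (the rewrite author's own statement) =====
-- stated objective: faster
-- what changed: Instead of scanning all m residues for each representative (membership-testing the list idealset each time), B reduces idealset to a set of residues once and builds each coset directly as sorted((r-d)%m for d in the reduced ideal), so the inner O(m*|idealset|) scan disappears.
import Mathlib
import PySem

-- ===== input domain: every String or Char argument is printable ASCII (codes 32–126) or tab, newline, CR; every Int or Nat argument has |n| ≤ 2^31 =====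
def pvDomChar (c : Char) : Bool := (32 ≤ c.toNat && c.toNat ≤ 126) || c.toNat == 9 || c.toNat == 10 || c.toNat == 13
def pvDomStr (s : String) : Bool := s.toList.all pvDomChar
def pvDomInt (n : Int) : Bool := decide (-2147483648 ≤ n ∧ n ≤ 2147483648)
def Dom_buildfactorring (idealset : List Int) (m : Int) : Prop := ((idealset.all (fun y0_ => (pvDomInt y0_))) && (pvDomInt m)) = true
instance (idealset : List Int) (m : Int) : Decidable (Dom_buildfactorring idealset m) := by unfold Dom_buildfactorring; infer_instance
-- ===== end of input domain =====

-- B builds each coset directly from the once-reduced set of ideal residues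
-- (sorted((r-d)%m for d in I)) instead of scanning all m residues per representative.

-- ===== PORT A =====
-- inner loop body: 'if (val1 - val2) % m in idealset: …'; indices into used are always in range (0 ≤ i < m = len(used))
def pvAInner (idealset : List Int) (m val1 : Int)
    (st : PySem.Dict Int (List Int) × List Bool) (val2 : Int) :
    PySem.Dict Int (List Int) × List Bool :=
  if PySem.Int.mod (val1 - val2) m ∈ idealset then
    let fr := if st.1.get? val1 = none then st.1.insert val1 ([] : List Int) else st.1
    (fr.modify val1 [] (fun l => l ++ [val2]), PySem.List.pySetD st.2 val2 true)
  else st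

-- outer loop body: 'if not used[val1]: <inner loop>; used[val1] = True'
def pvAOuter (idealset : List Int) (m : Int)
    (st : PySem.Dict Int (List Int) × List Bool) (val1 : Int) :
    PySem.Dict Int (List Int) × List Bool :=
  if PySem.List.pyGetD st.2 val1 false = true then st
  else
    let st' := (PySem.List.pyRange 0 m 1).foldl (pvAInner idealset m val1) st
    (st'.1, PySem.List.pySetD st'.2 val1 true)

def buildfactorring (idealset : List Int) (m : Int) : List (Int × List Int) :=
  ((PySem.List.pyRange 0 m 1).foldl (pvAOuter idealset m)
    (PySem.Dict.empty, List.replicate m.toNat false)).1.items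

-- ===== PORT B =====
-- members = sorted((r - d) % m for d in I)
def pvBMembers (I : List Int) (m r : Int) : List Int :=
  PySem.List.sorted (I.map (fun d => PySem.Int.mod (r - d) m)) (fun x => x) false

-- loop body: 'if not used[r]: members = …; if members: factorring[r] = members; for v in members: used[v] = True; used[r] = True'
def pvBStep (I : List Int) (m : Int)
    (st : PySem.Dict Int (List Int) × List Bool) (r : Int) :
    PySem.Dict Int (List Int) × List Bool :=
  if PySem.List.pyGetD st.2 r false = true then st
  else
    let members := pvBMembers I m r
    let fr := if members = [] then st.1 else st.1.insert r members
    let used := members.foldl (fun u v => PySem.List.pySetD u v true) st.2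
    (fr, PySem.List.pySetD used r true)

def buildfactorring_alt (idealset : List Int) (m : Int) : List (Int × List Int) :=
  let I : PySem.Set Int :=
    PySem.Set.ofList (idealset.filter (fun x => decide (0 ≤ x) && decide (x < m)))
  ((PySem.List.pyRange 0 m 1).foldl (pvBStep I m)
    (PySem.Dict.empty, List.replicate m.toNat false)).1.items

-- ===== PRECONDITION & SPEC =====
def Spec_buildfactorring (idealset : List Int) (m : Int) (out : List (Int × List Int)) : Prop := out = buildfactorring_alt idealset m
instance (idealset : List Int) (m : Int) (out : List (Int × List Int)) : Decidable (Spec_buildfactorring idealset m out) := by unfold Spec_buildfactorring; infer_instance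

-- ===== CLAIM (what is proved, stated in full; the proofs are below) =====
def Claim_equal_buildfactorring : Prop := ∀ (idealset : List Int) (m : Int), Dom_buildfactorring idealset m → Spec_buildfactorring idealset m (buildfactorring idealset m)

-- ===== LEMMAS AND PROOFS =====
theorem pv_insert_insert_same {κ ν : Type} [BEq κ] [LawfulBEq κ]
    (d : PySem.Dict κ ν) (k : κ) (v w : ν) :
    (d.insert k v).insert k w = d.insert k w := by
  unfold PySem.Dict.insert
  by_cases h : d.contains k = true
  · have h2 : (PySem.Dict.mk (d.items.map (fun p => if p.1 == k then (k, v) else p)) : PySem.Dict κ ν).contains k = true := by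
      simp only [PySem.Dict.contains, List.any_eq_true] at h ⊢
      obtain ⟨p, hp, he⟩ := h
      exact ⟨(k, v), List.mem_map.mpr ⟨p, hp, by simp [he]⟩, by simp⟩
    simp only [h, if_true, h2]
    congr 1
    simp only [List.map_map]
    apply List.map_congr_left
    intro p _
    by_cases hp : (p.1 == k) = true <;> simp [Function.comp, hp]
  · have hcf : d.contains k = false := Bool.eq_false_iff.mpr h
    have h' : d.items.any (fun p => p.1 == k) = false := hcf
    have hall := List.any_eq_false.mp h'
    have h2 : (PySem.Dict.mk (d.items ++ [(k, v)]) : PySem.Dict κ ν).contains k = true := by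
      simp [PySem.Dict.contains]
    rw [if_neg h, if_pos h2, if_neg h]
    congr 1
    simp only [List.map_append]
    have hmap : d.items.map (fun p => if p.1 == k then (k, w) else p) = d.items := by
      rw [List.map_congr_left (g := fun p => p) (fun p hp => by
        simp [Bool.eq_false_iff.mpr (hall p hp)])]
      exact List.map_id' d.items
    rw [hmap]
    simp

theorem pv_modify_of_get?_none {κ ν : Type} [BEq κ] [LawfulBEq κ]
    (d : PySem.Dict κ ν) (k : κ) (d0 : ν) (f : ν → ν) (h : d.get? k = none) :
    d.modify k d0 f = d.insert k (f d0) := by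
  unfold PySem.Dict.modify
  rw [PySem.Dict.getD_of_not_contains _ _ ((PySem.Dict.get?_eq_none_iff_contains d k).mp h)]

theorem pv_modify_modify {κ ν : Type} [BEq κ] [LawfulBEq κ]
    (d : PySem.Dict κ ν) (k : κ) (d0 : ν) (f g : ν → ν) :
    (d.modify k d0 f).modify k d0 g = d.modify k d0 (fun x => g (f x)) := by
  unfold PySem.Dict.modify
  rw [PySem.Dict.getD_insert_self, pv_insert_insert_same]

theorem pv_ins_modify (fr : PySem.Dict Int (List Int)) (v v2 : Int) :
    ((if fr.get? v = none then fr.insert v ([] : List Int) else fr).modify v []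
      (fun l => l ++ [v2])) = fr.modify v [] (fun l => l ++ [v2]) := by
  by_cases h : fr.get? v = none
  · rw [if_pos h, pv_modify_of_get?_none _ _ _ _ h]
    unfold PySem.Dict.modify
    rw [PySem.Dict.getD_insert_self, pv_insert_insert_same]
  · rw [if_neg h]

theorem pv_inner_closed (idealset : List Int) (m v : Int) :
    ∀ (L : List Int) (fr : PySem.Dict Int (List Int)) (used : List Bool),
    L.foldl (pvAInner idealset m v) (fr, used) =
      ((if L.filter (fun x => decide (PySem.Int.mod (v - x) m ∈ idealset)) = []
        then fr
        else fr.modify v [] (fun l => l ++ L.filter (fun x => decide (PySem.Int.mod (v - x) m ∈ idealset)))),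
       (L.filter (fun x => decide (PySem.Int.mod (v - x) m ∈ idealset))).foldl
         (fun u x => PySem.List.pySetD u x true) used) := by
  intro L
  induction L with
  | nil => intro fr used; simp
  | cons x L ih =>
    intro fr used
    simp only [List.foldl_cons, List.filter_cons]
    by_cases hx : PySem.Int.mod (v - x) m ∈ idealset
    · simp only [hx, decide_true, if_true]
      rw [show pvAInner idealset m v (fr, used) x =
        (((if fr.get? v = none then fr.insert v ([] : List Int) else fr).modify v []
          (fun l => l ++ [x])), PySem.List.pySetD used x true) by simp [pvAInner, hx]]
      rw [pv_ins_modify, ih]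
      simp only [List.foldl_cons, Prod.mk.injEq]
      constructor
      · by_cases hM : L.filter (fun y => decide (PySem.Int.mod (v - y) m ∈ idealset)) = []
        · rw [if_pos hM, hM]
          simp
        · rw [if_neg hM, if_neg (by simp), pv_modify_modify]
          congr 1
          funext l
          simp
      · trivial
    · rw [decide_eq_false hx]
      simp only [Bool.false_eq_true, if_false]
      rw [show pvAInner idealset m v (fr, used) x = (fr, used) by simp [pvAInner, hx]]
      exact ih fr used

theorem pv_mod_round {m : Int} (hm : 0 < m) (v d : Int) (hd0 : 0 ≤ d) (hdm : d < m) :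
    PySem.Int.mod (v - PySem.Int.mod (v - d) m) m = d := by
  rw [PySem.Int.mod_eq_emod_of_pos hm, PySem.Int.mod_eq_emod_of_pos hm, Int.emod_def (v - d) m]
  have h : v - (v - d - m * ((v - d) / m)) = d + m * ((v - d) / m) := by ring
  rw [h, Int.add_mul_emod_self_left, Int.emod_eq_of_lt hd0 hdm]

theorem pv_members_eq (idealset : List Int) (m v : Int) (h0 : 0 ≤ v) (hv : v < m) :
    (PySem.List.pyRange 0 m 1).filter (fun x => decide (PySem.Int.mod (v - x) m ∈ idealset)) =
      pvBMembers (PySem.Set.ofList (idealset.filter (fun x => decide (0 ≤ x) && decide (x < m)))) m v := by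
  have hm : 0 < m := lt_of_le_of_lt h0 hv
  unfold pvBMembers
  refine (PySem.List.sorted_eq_of_perm_of_pairwise_lt _ _ _ ?_ ?_).symm
  · -- Perm
    apply (List.perm_ext_iff_of_nodup ?_ ?_).mpr
    · intro a
      simp only [List.mem_filter, PySem.List.mem_pyRange_one, decide_eq_true_eq, List.mem_map,
        PySem.Set.mem_ofList, Bool.and_eq_true]
      constructor
      · rintro ⟨⟨ha0, ham⟩, hmem⟩
        exact ⟨PySem.Int.mod (v - a) m,
          ⟨hmem, PySem.Int.mod_nonneg _ hm, PySem.Int.mod_lt _ hm⟩,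
          pv_mod_round hm v a ha0 ham⟩
      · rintro ⟨d, ⟨hdi, hd0, hdm⟩, rfl⟩
        refine ⟨⟨PySem.Int.mod_nonneg _ hm, PySem.Int.mod_lt _ hm⟩, ?_⟩
        rw [pv_mod_round hm v d hd0 hdm]
        exact hdi
    · exact (PySem.List.nodup_pyRange_one 0 m).filter _
    · apply List.Nodup.map_on ?_ (PySem.Set.nodup_ofList _)
      intro d1 h1 d2 h2 hf
      have h1' : d1 ∈ idealset ∧ 0 ≤ d1 ∧ d1 < m := by
        simpa using (PySem.Set.mem_ofList _ _).mp h1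
      have h2' : d2 ∈ idealset ∧ 0 ≤ d2 ∧ d2 < m := by
        simpa using (PySem.Set.mem_ofList _ _).mp h2
      have := congrArg (fun x => PySem.Int.mod (v - x) m) hf
      simpa [pv_mod_round hm v d1 h1'.2.1 h1'.2.2, pv_mod_round hm v d2 h2'.2.1 h2'.2.2] using this
  · -- Pairwise <
    exact (PySem.List.pairwise_lt_pyRange_one 0 m).filter _

def pvInv (m : Int) (st : PySem.Dict Int (List Int) × List Bool) : Prop :=
  st.2.length = m.toNat ∧
  ∀ k ∈ st.1.keys, 0 ≤ k ∧ k < m ∧ PySem.List.pyGetD st.2 k false = true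

theorem pv_get?_none_of_unmarked (m : Int) (st : PySem.Dict Int (List Int) × List Bool)
    (hinv : pvInv m st) (v : Int) (hu : ¬ PySem.List.pyGetD st.2 v false = true) :
    st.1.get? v = none := by
  rw [PySem.Dict.get?_eq_none_iff_contains]
  by_contra hc
  have hc' : st.1.contains v = true := by
    cases h : st.1.contains v
    · exact absurd h hc
    · rfl
  exact hu (hinv.2 v ((PySem.Dict.contains_iff_mem_keys _ _).mp hc')).2.2

theorem pv_step_eq (idealset : List Int) (m v : Int) (h0 : 0 ≤ v) (hv : v < m)
    (st : PySem.Dict Int (List Int) × List Bool) (hinv : pvInv m st) :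
    pvAOuter idealset m st v =
      pvBStep (PySem.Set.ofList (idealset.filter (fun x => decide (0 ≤ x) && decide (x < m)))) m st v := by
  unfold pvAOuter pvBStep
  by_cases hu : PySem.List.pyGetD st.2 v false = true
  · rw [if_pos hu, if_pos hu]
  · rw [if_neg hu, if_neg hu]
    have hM := pv_members_eq idealset m v h0 hv
    rw [pv_inner_closed idealset m v (PySem.List.pyRange 0 m 1) st.1 st.2]
    simp only [hM, Prod.mk.injEq]
    refine ⟨?_, trivial⟩
    by_cases hnil : pvBMembers (PySem.Set.ofList (idealset.filter (fun x => decide (0 ≤ x) && decide (x < m)))) m v = []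
    · rw [if_pos hnil, if_pos hnil]
    · rw [if_neg hnil, if_neg hnil,
        pv_modify_of_get?_none _ _ _ _ (pv_get?_none_of_unmarked m st hinv v hu)]
      simp

theorem pv_getD_set_mono (u : List Bool) (x k : Int) (hx : 0 ≤ x) (hk : 0 ≤ k)
    (h : PySem.List.pyGetD u k false = true) :
    PySem.List.pyGetD (PySem.List.pySetD u x true) k false = true := by
  rw [PySem.List.pySetD_of_nonneg _ _ hx]
  rw [PySem.List.pyGetD_of_nonneg _ _ hk] at h ⊢
  rw [List.getD_eq_getElem?_getD] at h ⊢
  rw [List.getElem?_set]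
  by_cases he : x.toNat = k.toNat
  · have hlt : k.toNat < u.length := by
      by_contra hge
      rw [List.getElem?_eq_none (by omega)] at h
      simp at h
    simp [he, hlt]
  · simp [he, h]

theorem pv_getD_set_self (u : List Bool) (v : Int) (h0 : 0 ≤ v) (hlen : v.toNat < u.length) :
    PySem.List.pyGetD (PySem.List.pySetD u v true) v false = true := by
  rw [PySem.List.pySetD_of_nonneg _ _ h0, PySem.List.pyGetD_of_nonneg _ _ h0,
    List.getD_eq_getElem?_getD, List.getElem?_set]
  simp [hlen]

theorem pv_mark_length (M : List Int) : ∀ (u : List Bool),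
    (M.foldl (fun u x => PySem.List.pySetD u x true) u).length = u.length := by
  induction M with
  | nil => intro u; rfl
  | cons x M ih =>
    intro u
    rw [List.foldl_cons, ih, PySem.List.length_pySetD]

theorem pv_mark_mono (M : List Int) : ∀ (u : List Bool) (k : Int),
    (∀ x ∈ M, 0 ≤ x) → 0 ≤ k → PySem.List.pyGetD u k false = true →
    PySem.List.pyGetD (M.foldl (fun u x => PySem.List.pySetD u x true) u) k false = true := by
  induction M with
  | nil => intro u k _ _ h; exact h
  | cons x M ih =>
    intro u k hxs hk h
    rw [List.foldl_cons]
    exact ih _ k (fun y hy => hxs y (List.mem_cons_of_mem _ hy)) hk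
      (pv_getD_set_mono u x k (hxs x (List.mem_cons_self)) hk h)

theorem pv_step_inv (idealset : List Int) (m v : Int) (h0 : 0 ≤ v) (hv : v < m)
    (st : PySem.Dict Int (List Int) × List Bool) (hinv : pvInv m st) :
    pvInv m (pvAOuter idealset m st v) := by
  unfold pvAOuter
  by_cases hu : PySem.List.pyGetD st.2 v false = true
  · rw [if_pos hu]; exact hinv
  · rw [if_neg hu]
    rw [pv_inner_closed idealset m v (PySem.List.pyRange 0 m 1) st.1 st.2]
    set M := (PySem.List.pyRange 0 m 1).filter
      (fun x => decide (PySem.Int.mod (v - x) m ∈ idealset)) with hMdef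
    have hMpos : ∀ x ∈ M, 0 ≤ x := by
      intro x hx
      have := PySem.List.mem_pyRange_one.mp (List.mem_filter.mp hx).1
      omega
    constructor
    · simp only [PySem.List.length_pySetD, pv_mark_length, hinv.1]
    · intro k hk
      have hlen2 : (M.foldl (fun u x => PySem.List.pySetD u x true) st.2).length = m.toNat := by
        rw [pv_mark_length, hinv.1]
      by_cases hnil : M = []
      · rw [if_pos hnil] at hk
        obtain ⟨hk0, hkm, hmark⟩ := hinv.2 k hk
        refine ⟨hk0, hkm, ?_⟩
        exact pv_getD_set_mono _ v k h0 hk0 (pv_mark_mono M st.2 k hMpos hk0 hmark)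
      · rw [if_neg hnil] at hk
        have hk' : k = v ∨ k ∈ st.1.keys := by
          have := hk
          rw [PySem.Dict.keys_modify] at this
          exact (PySem.Dict.mem_keys_insert _ _ _ _).mp this
        rcases hk' with rfl | hko
        · refine ⟨h0, hv, ?_⟩
          exact pv_getD_set_self _ k h0 (by rw [hlen2]; omega)
        · obtain ⟨hk0, hkm, hmark⟩ := hinv.2 k hko
          exact ⟨hk0, hkm,
            pv_getD_set_mono _ v k h0 hk0 (pv_mark_mono M st.2 k hMpos hk0 hmark)⟩

theorem pv_fold_eq (idealset : List Int) (m : Int) :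
    ∀ (L : List Int) (st : PySem.Dict Int (List Int) × List Bool),
    (∀ x ∈ L, 0 ≤ x ∧ x < m) → pvInv m st →
    L.foldl (pvAOuter idealset m) st =
      L.foldl (pvBStep (PySem.Set.ofList (idealset.filter (fun x => decide (0 ≤ x) && decide (x < m)))) m) st := by
  intro L
  induction L with
  | nil => intro st _ _; rfl
  | cons x L ih =>
    intro st hL hinv
    rw [List.foldl_cons, List.foldl_cons,
      ← pv_step_eq idealset m x (hL x List.mem_cons_self).1 (hL x List.mem_cons_self).2 st hinv]
    exact ih _ (fun y hy => hL y (List.mem_cons_of_mem _ hy))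
      (pv_step_inv idealset m x (hL x List.mem_cons_self).1 (hL x List.mem_cons_self).2 st hinv)

-- ===== VERDICT (by name: the statement is the Claim_ definition above) =====
theorem buildfactorring_spec : Claim_equal_buildfactorring := by
  intro idealset m _
  unfold Spec_buildfactorring buildfactorring buildfactorring_alt
  rw [pv_fold_eq idealset m _ _ (fun x hx => by
        have := PySem.List.mem_pyRange_one.mp hx; omega)
      ⟨by simp, by simp [PySem.Dict.keys_empty]⟩]
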